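-- pv_equiv track=rewrite | github.com/sebhtml/Arc-Prize-2024-sebhtml | playout_simulation.py | translate_board
-- ===== SOURCE A (Python) =====
-- import copy
--
-- def translate_board(board, translation_x: int, translation_y: int):
--     width = len(board[0])
--     height = len(board)
--     new_board = copy.deepcopy(board)
--     for x in range(width):
--         for y in range(height):
--             new_board[y][x] = 0
--     for src_x in range(width):
--         dst_x = src_x + translation_x
--         if dst_x < 0 or dst_x >= width:
--             continue
--         for src_y in range(height):
--             dst_y = src_y + translation_y
--             if dst_y < 0 or dst_y >= height:
--                 continue
--             new_board[dst_y][dst_x] = board[src_y][src_x]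
--     return new_board
-- ===== SOURCE B (Python) =====
-- def translate_board(board, translation_x: int, translation_y: int):
--     width = len(board[0])
--
--     def shift(seq, k, pad):
--         # shift a sequence by k, filling vacated slots with pad (slice + pad blocks)
--         n = len(seq)
--         if k >= 0:
--             return [pad] * min(k, n) + seq[:max(0, n - k)]
--         return seq[-k:] + [pad] * min(-k, n)
--
--     shifted_rows = [shift(row, translation_x, 0) for row in board]
--     return shift(shifted_rows, translation_y, [0] * width)
-- ===== Notes on version B (the rewrite author's own statement) =====
-- stated objective: alternative
-- what changed: B shifts whole blocks: each row is slice-shifted horizontally and the list of rows is slice-shifted vertically, concatenating zero-padding blocks, instead of A's deepcopy + per-cell zero-fill + per-cell scatter loops.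
-- outside the precondition, e.g. on translate_board([[1, 2], [3, 4, 5]], 1, 0): A returns [[0, 1], [0, 3, 5]], B returns [[0, 1], [0, 3, 4]]
import Mathlib
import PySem

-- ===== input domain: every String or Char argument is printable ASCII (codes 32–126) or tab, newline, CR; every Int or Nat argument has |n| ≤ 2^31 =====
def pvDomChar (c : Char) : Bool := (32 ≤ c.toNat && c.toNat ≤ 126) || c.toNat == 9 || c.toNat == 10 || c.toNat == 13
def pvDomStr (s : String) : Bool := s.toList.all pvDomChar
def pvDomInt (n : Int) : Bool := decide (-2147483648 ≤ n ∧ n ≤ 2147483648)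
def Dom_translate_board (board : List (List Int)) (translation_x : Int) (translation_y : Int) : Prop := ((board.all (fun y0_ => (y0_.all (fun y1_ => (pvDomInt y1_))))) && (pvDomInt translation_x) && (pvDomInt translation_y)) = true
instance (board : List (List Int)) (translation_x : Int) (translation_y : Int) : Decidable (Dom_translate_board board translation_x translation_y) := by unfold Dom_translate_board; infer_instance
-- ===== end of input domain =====

-- B shifts whole blocks (each row slice-shifted horizontally, the row list slice-shifted
-- vertically, concatenating zero-padding blocks) instead of A's deepcopy + per-cell
-- zero-fill + per-cell scatter loops; objective: alternative.

-- A-side indexing/assignment helpers (exact ports of board[y][x] reads and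
-- new_board[y][x] = v writes; exact on Pre_, where all indices used are in range)
def pvGet2 (g : List (List Int)) (y x : Int) : Int :=
  PySem.List.pyGetD (PySem.List.pyGetD g y []) x 0

def pvSet2 (g : List (List Int)) (y x v : Int) : List (List Int) :=
  PySem.List.pySetD g y (PySem.List.pySetD (PySem.List.pyGetD g y []) x v)

-- ===== PORT A =====
def translate_board (board : List (List Int)) (translation_x : Int) (translation_y : Int) : List (List Int) :=
  let width : Int := (PySem.List.pyGetD board 0 []).length
  let height : Int := board.length
  -- new_board = copy.deepcopy(board)  (a fresh equal value)
  let new_board := board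
  -- zero-fill prepass
  let new_board := (PySem.List.pyRange 0 width 1).foldl (fun nb x =>
    (PySem.List.pyRange 0 height 1).foldl (fun nb y => pvSet2 nb y x 0) nb) new_board
  -- scatter
  (PySem.List.pyRange 0 width 1).foldl (fun nb src_x =>
    let dst_x := src_x + translation_x
    if dst_x < 0 ∨ width ≤ dst_x then nb
    else (PySem.List.pyRange 0 height 1).foldl (fun nb src_y =>
      let dst_y := src_y + translation_y
      if dst_y < 0 ∨ height ≤ dst_y then nb
      else pvSet2 nb dst_y dst_x (pvGet2 board src_y src_x)) nb) new_board

-- ===== PORT B =====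
-- shift(seq, k, pad) of Source B: [pad]*min(k,n) + seq[:max(0,n-k)]  /  seq[-k:] + [pad]*min(-k,n)
def pvShift {α : Type} (seq : List α) (k : Int) (pad : α) : List α :=
  let n : Int := seq.length
  if 0 ≤ k then
    List.replicate (min k n).toNat pad ++ PySem.List.slice seq none (some (max 0 (n - k)))
  else
    PySem.List.slice seq (some (-k)) none ++ List.replicate (min (-k) n).toNat pad

def translate_board_alt (board : List (List Int)) (translation_x : Int) (translation_y : Int) : List (List Int) :=
  let width : Nat := (PySem.List.pyGetD board 0 []).length
  let shifted_rows := board.map (fun row => pvShift row translation_x 0)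
  pvShift shifted_rows translation_y (List.replicate width 0)

-- ===== PRECONDITION & SPEC =====
-- Pre_ excludes the empty board (A raises IndexError on len(board[0])) and ragged boards:
-- on a ragged board A either raises IndexError (some row shorter than row 0) or returns a
-- board whose rows keep accidental deepcopy leftovers beyond the first-row width.
def Pre_translate_board (board : List (List Int)) (translation_x : Int) (translation_y : Int) : Prop :=
  board ≠ [] ∧ ∀ r ∈ board, r.length = (board.getD 0 []).length
instance (board : List (List Int)) (translation_x : Int) (translation_y : Int) : Decidable (Pre_translate_board board translation_x translation_y) := by unfold Pre_translate_board; infer_instance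

def pvWitness_translate_board : List (List Int) × Int × Int := ([[1, 2], [3, 4]], 1, 0)

def Spec_translate_board (board : List (List Int)) (translation_x : Int) (translation_y : Int) (out : List (List Int)) : Prop := out = translate_board_alt board translation_x translation_y
instance (board : List (List Int)) (translation_x : Int) (translation_y : Int) (out : List (List Int)) : Decidable (Spec_translate_board board translation_x translation_y out) := by unfold Spec_translate_board; infer_instance

-- ===== CLAIM (what is proved, stated in full; the proofs are below) =====
def Claim_equal_translate_board : Prop := ∀ (board : List (List Int)) (translation_x : Int) (translation_y : Int), Dom_translate_board board translation_x translation_y → Pre_translate_board board translation_x translation_y → Spec_translate_board board translation_x translation_y (translate_board board translation_x translation_y)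

-- ===== LEMMAS AND PROOFS =====

-- proof-side view of a grid: Nat-indexed cell read and rectangular shape
def gget (g : List (List Int)) (i j : Nat) : Int := (g.getD i []).getD j 0

def pvShape (H W : Nat) (g : List (List Int)) : Prop :=
  g.length = H ∧ ∀ r ∈ g, r.length = W

lemma pvGet2_eq (g : List (List Int)) (y x : Int) (hy : 0 ≤ y) (hx : 0 ≤ x) :
    pvGet2 g y x = gget g y.toNat x.toNat := by
  lift y to ℕ using hy with n
  lift x to ℕ using hx with m
  simp [pvGet2, gget, List.getD]

lemma pvSet2_eq (g : List (List Int)) (y x v : Int) (hy : 0 ≤ y) (hx : 0 ≤ x) :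
    pvSet2 g y x v = g.set y.toNat ((g.getD y.toNat []).set x.toNat v) := by
  lift y to ℕ using hy with n
  lift x to ℕ using hx with m
  simp [pvSet2, List.getD]

lemma pvShape_set {H W : Nat} {g : List (List Int)} (hg : pvShape H W g)
    (y x : Nat) (v : Int) (hy : y < H) :
    pvShape H W (g.set y ((g.getD y []).set x v)) := by
  obtain ⟨hl, hr⟩ := hg
  refine ⟨by simp [hl], ?_⟩
  intro r hrm
  rcases List.mem_or_eq_of_mem_set hrm with h | h
  · exact hr r h
  · subst h
    rw [List.length_set]
    have : g.getD y [] = g[y] := List.getD_eq_getElem g [] (by omega)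
    rw [this]
    exact hr _ (List.getElem_mem _)

lemma pv_getD_set {α : Type} (l : List α) (n m : Nat) (a d : α) :
    (l.set n a).getD m d = if n = m ∧ n < l.length then a else l.getD m d := by
  rcases Nat.lt_or_ge m l.length with h | h
  · rw [List.getD_eq_getElem _ d (by simpa using h), List.getElem_set (by simpa using h),
        List.getD_eq_getElem _ d h]
    split_ifs with h1 h2 h2 <;> first | rfl | omega
  · rw [List.getD_eq_default _ d (by simpa using h), List.getD_eq_default _ d h]
    split_ifs with h1 <;> [omega; rfl]

lemma gget_set {H W : Nat} {g : List (List Int)} (hg : pvShape H W g)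
    (y x : Nat) (v : Int) (hy : y < H) (hx : x < W) (i j : Nat) :
    gget (g.set y ((g.getD y []).set x v)) i j =
      if i = y ∧ j = x then v else gget g i j := by
  obtain ⟨hl, hr⟩ := hg
  have hyl : y < g.length := by omega
  have hrow : (g.getD y []).length = W := by
    rw [List.getD_eq_getElem g [] hyl]; exact hr _ (List.getElem_mem _)
  unfold gget
  rw [pv_getD_set]
  by_cases hiy : i = y
  · subst hiy
    rw [if_pos ⟨rfl, hyl⟩, pv_getD_set]
    split_ifs with h1 h2 h2 <;> first | rfl | omega
  · rw [if_neg (by rintro ⟨h, -⟩; exact hiy h.symm), if_neg (by tauto)]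

-- zero-filling one column x ∈ [0, W) over a list of row indices
lemma zcol {H W : Nat} (x : Int) (hx0 : 0 ≤ x) (hxW : x.toNat < W)
    (L : List Int) (hL : ∀ y ∈ L, 0 ≤ y ∧ y.toNat < H)
    (g : List (List Int)) (hg : pvShape H W g) :
    pvShape H W (L.foldl (fun nb y => pvSet2 nb y x 0) g) ∧
    ∀ i j : Nat, gget (L.foldl (fun nb y => pvSet2 nb y x 0) g) i j =
      if (i : Int) ∈ L ∧ j = x.toNat then 0 else gget g i j := by
  induction L generalizing g with
  | nil => simp [hg]
  | cons y rest ih =>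
    obtain ⟨hy0, hyH⟩ := hL y (List.mem_cons_self ..)
    have hstep : pvSet2 g y x 0 = g.set y.toNat ((g.getD y.toNat []).set x.toNat 0) :=
      pvSet2_eq g y x 0 hy0 hx0
    have hg' : pvShape H W (pvSet2 g y x 0) := by
      rw [hstep]; exact pvShape_set hg _ _ _ hyH
    obtain ⟨hsh, hget⟩ := ih (fun z hz => hL z (List.mem_cons_of_mem _ hz)) _ hg'
    refine ⟨by simpa using hsh, ?_⟩
    intro i j
    rw [List.foldl_cons, hget i j, hstep, gget_set hg _ _ _ hyH hxW]
    by_cases hm : (i : Int) ∈ rest ∧ j = x.toNat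
    · rw [if_pos hm, if_pos ⟨List.mem_cons_of_mem _ hm.1, hm.2⟩]
    · rw [if_neg hm]
      by_cases hiy : i = y.toNat ∧ j = x.toNat
      · rw [if_pos hiy,
            if_pos (⟨List.mem_cons.mpr (Or.inl (by omega)), hiy.2⟩ :
              (i : Int) ∈ y :: rest ∧ j = x.toNat)]
      · rw [if_neg hiy, if_neg (by
          rintro ⟨hmem, hj⟩
          rcases List.mem_cons.mp hmem with h | h
          · exact hiy ⟨by omega, hj⟩
          · exact hm ⟨h, hj⟩)]

-- the zero-fill prepass over a list of column indices
lemma zfill {H W : Nat} (Lx : List Int) (hLx : ∀ x ∈ Lx, 0 ≤ x ∧ x.toNat < W)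
    (g : List (List Int)) (hg : pvShape H W g) :
    pvShape H W (Lx.foldl (fun nb x => (PySem.List.pyRange 0 (H : Int) 1).foldl
        (fun nb y => pvSet2 nb y x 0) nb) g) ∧
    ∀ i j : Nat, gget (Lx.foldl (fun nb x => (PySem.List.pyRange 0 (H : Int) 1).foldl
        (fun nb y => pvSet2 nb y x 0) nb) g) i j =
      if (j : Int) ∈ Lx ∧ i < H then 0 else gget g i j := by
  induction Lx generalizing g with
  | nil => simp [hg]
  | cons x rest ih =>
    obtain ⟨hx0, hxW⟩ := hLx x (List.mem_cons_self ..)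
    have hrange : ∀ y ∈ PySem.List.pyRange 0 (H : Int) 1, 0 ≤ y ∧ y.toNat < H := by
      intro y hy
      rw [PySem.List.mem_pyRange_one] at hy
      omega
    obtain ⟨hg', hcol⟩ := zcol x hx0 hxW _ hrange g hg
    obtain ⟨hsh, hget⟩ := ih (fun z hz => hLx z (List.mem_cons_of_mem _ hz)) _ hg'
    refine ⟨by simpa using hsh, ?_⟩
    intro i j
    rw [List.foldl_cons, hget i j, hcol i j]
    by_cases hm : (j : Int) ∈ rest ∧ i < H
    · rw [if_pos hm, if_pos ⟨List.mem_cons_of_mem _ hm.1, hm.2⟩]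
    · rw [if_neg hm]
      by_cases hc : i < H ∧ j = x.toNat
      · rw [if_pos (⟨by rw [PySem.List.mem_pyRange_one]; omega, hc.2⟩ :
              (i : Int) ∈ PySem.List.pyRange 0 (H : Int) 1 ∧ j = x.toNat),
            if_pos (⟨List.mem_cons.mpr (Or.inl (by omega)), hc.1⟩ :
              (j : Int) ∈ x :: rest ∧ i < H)]
      · rw [if_neg (by
            rintro ⟨hmem, hj⟩
            rw [PySem.List.mem_pyRange_one] at hmem
            exact hc ⟨by omega, hj⟩),
          if_neg (by
            rintro ⟨hmem, hiH⟩
            rcases List.mem_cons.mp hmem with h | h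
            · exact hc ⟨hiH, by omega⟩
            · exact hm ⟨h, hiH⟩)]

-- scatter of one source column src_x whose destination column dst_x is in range
lemma scol {H W : Nat} (board : List (List Int)) (tx ty : Int)
    (src_x : Int) (hs0 : 0 ≤ src_x) (hd0 : 0 ≤ src_x + tx) (hdW : (src_x + tx).toNat < W)
    (L : List Int) (hL : ∀ y ∈ L, 0 ≤ y ∧ y.toNat < H)
    (g : List (List Int)) (hg : pvShape H W g) :
    pvShape H W (L.foldl (fun nb src_y =>
        if src_y + ty < 0 ∨ (H : Int) ≤ src_y + ty then nb
        else pvSet2 nb (src_y + ty) (src_x + tx) (pvGet2 board src_y src_x)) g) ∧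
    ∀ i j : Nat, i < H → gget (L.foldl (fun nb src_y =>
        if src_y + ty < 0 ∨ (H : Int) ≤ src_y + ty then nb
        else pvSet2 nb (src_y + ty) (src_x + tx) (pvGet2 board src_y src_x)) g) i j =
      if ((i : Int) - ty) ∈ L ∧ j = (src_x + tx).toNat
      then gget board ((i : Int) - ty).toNat src_x.toNat else gget g i j := by
  induction L generalizing g with
  | nil => simp [hg]
  | cons y rest ih =>
    obtain ⟨hy0, hyH⟩ := hL y (List.mem_cons_self ..)
    by_cases hout : y + ty < 0 ∨ (H : Int) ≤ y + ty
    · obtain ⟨hsh, hget⟩ := ih (fun z hz => hL z (List.mem_cons_of_mem _ hz)) g hg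
      refine ⟨by simpa [hout] using hsh, ?_⟩
      intro i j hiH
      rw [List.foldl_cons]
      simp only [if_pos hout]
      rw [hget i j hiH]
      by_cases hm : (i : Int) - ty ∈ rest ∧ j = (src_x + tx).toNat
      · rw [if_pos hm, if_pos ⟨List.mem_cons_of_mem _ hm.1, hm.2⟩]
      · rw [if_neg hm, if_neg (by
          rintro ⟨hmem, hj⟩
          rcases List.mem_cons.mp hmem with h | h
          · omega
          · exact hm ⟨h, hj⟩)]
    · simp only [not_or, not_lt, not_le] at hout
      have hstep : pvSet2 g (y + ty) (src_x + tx) (pvGet2 board y src_x) =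
          g.set (y + ty).toNat ((g.getD (y + ty).toNat []).set (src_x + tx).toNat
            (pvGet2 board y src_x)) := pvSet2_eq _ _ _ _ (by omega) hd0
      have hyH' : (y + ty).toNat < H := by omega
      have hg' : pvShape H W (pvSet2 g (y + ty) (src_x + tx) (pvGet2 board y src_x)) := by
        rw [hstep]; exact pvShape_set hg _ _ _ hyH'
      obtain ⟨hsh, hget⟩ := ih (fun z hz => hL z (List.mem_cons_of_mem _ hz)) _ hg'
      have hni : ¬ (y + ty < 0 ∨ (H : Int) ≤ y + ty) := by omega
      refine ⟨by rw [List.foldl_cons]; rw [if_neg hni]; exact hsh, ?_⟩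
      intro i j hiH
      rw [List.foldl_cons, if_neg hni]
      rw [hget i j hiH, hstep, gget_set hg _ _ _ hyH' hdW]
      by_cases hm : (i : Int) - ty ∈ rest ∧ j = (src_x + tx).toNat
      · rw [if_pos hm, if_pos ⟨List.mem_cons_of_mem _ hm.1, hm.2⟩]
      · rw [if_neg hm]
        by_cases hiy : i = (y + ty).toNat ∧ j = (src_x + tx).toNat
        · have h2 : ((i : Int) - ty).toNat = y.toNat := by omega
          rw [if_pos hiy, pvGet2_eq board y src_x hy0 hs0,
              if_pos (⟨List.mem_cons.mpr (Or.inl (by omega)), hiy.2⟩ :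
                (i : Int) - ty ∈ y :: rest ∧ j = (src_x + tx).toNat), h2]
        · rw [if_neg hiy, if_neg (by
            rintro ⟨hmem, hj⟩
            rcases List.mem_cons.mp hmem with h | h
            · exact hiy ⟨by omega, hj⟩
            · exact hm ⟨h, hj⟩)]

-- the scatter pass over a list of source columns
lemma srow {H W : Nat} (board : List (List Int)) (tx ty : Int)
    (Lx : List Int) (hLx : ∀ x ∈ Lx, 0 ≤ x)
    (g : List (List Int)) (hg : pvShape H W g) :
    pvShape H W (Lx.foldl (fun nb src_x =>
        if src_x + tx < 0 ∨ (W : Int) ≤ src_x + tx then nb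
        else (PySem.List.pyRange 0 (H : Int) 1).foldl (fun nb src_y =>
          if src_y + ty < 0 ∨ (H : Int) ≤ src_y + ty then nb
          else pvSet2 nb (src_y + ty) (src_x + tx) (pvGet2 board src_y src_x)) nb) g) ∧
    ∀ i j : Nat, i < H → j < W → gget (Lx.foldl (fun nb src_x =>
        if src_x + tx < 0 ∨ (W : Int) ≤ src_x + tx then nb
        else (PySem.List.pyRange 0 (H : Int) 1).foldl (fun nb src_y =>
          if src_y + ty < 0 ∨ (H : Int) ≤ src_y + ty then nb
          else pvSet2 nb (src_y + ty) (src_x + tx) (pvGet2 board src_y src_x)) nb) g) i j =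
      if ((j : Int) - tx) ∈ Lx ∧ 0 ≤ (i : Int) - ty ∧ (i : Int) - ty < (H : Int)
      then gget board ((i : Int) - ty).toNat ((j : Int) - tx).toNat else gget g i j := by
  induction Lx generalizing g with
  | nil => simp [hg]
  | cons x rest ih =>
    have hx0 : 0 ≤ x := hLx x (List.mem_cons_self ..)
    have hrange : ∀ y ∈ PySem.List.pyRange 0 (H : Int) 1, 0 ≤ y ∧ y.toNat < H := by
      intro y hy
      rw [PySem.List.mem_pyRange_one] at hy
      omega
    by_cases hout : x + tx < 0 ∨ (W : Int) ≤ x + tx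
    · obtain ⟨hsh, hget⟩ := ih (fun z hz => hLx z (List.mem_cons_of_mem _ hz)) g hg
      refine ⟨by simpa [hout] using hsh, ?_⟩
      intro i j hiH hjW
      rw [List.foldl_cons]
      simp only [if_pos hout]
      rw [hget i j hiH hjW]
      by_cases hm : ((j : Int) - tx) ∈ rest ∧ 0 ≤ (i : Int) - ty ∧ (i : Int) - ty < (H : Int)
      · rw [if_pos hm, if_pos ⟨List.mem_cons_of_mem _ hm.1, hm.2⟩]
      · rw [if_neg hm, if_neg (by
          rintro ⟨hmem, hrest⟩
          rcases List.mem_cons.mp hmem with h | h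
          · omega
          · exact hm ⟨h, hrest⟩)]
    · simp only [not_or, not_lt, not_le] at hout
      obtain ⟨hg', hcol⟩ := scol board tx ty x hx0 (by omega) (by omega) _ hrange g hg
      obtain ⟨hsh, hget⟩ := ih (fun z hz => hLx z (List.mem_cons_of_mem _ hz)) _ hg'
      have hni : ¬ (x + tx < 0 ∨ (W : Int) ≤ x + tx) := by omega
      refine ⟨by rw [List.foldl_cons]; rw [if_neg hni]; exact hsh, ?_⟩
      intro i j hiH hjW
      rw [List.foldl_cons, if_neg hni]
      rw [hget i j hiH hjW, hcol i j hiH]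
      by_cases hm : ((j : Int) - tx) ∈ rest ∧ 0 ≤ (i : Int) - ty ∧ (i : Int) - ty < (H : Int)
      · rw [if_pos hm, if_pos ⟨List.mem_cons_of_mem _ hm.1, hm.2⟩]
      · rw [if_neg hm]
        by_cases hc : ((i : Int) - ty) ∈ PySem.List.pyRange 0 (H : Int) 1 ∧ j = (x + tx).toNat
        · have hmem := hc.1
          rw [PySem.List.mem_pyRange_one] at hmem
          have h2 : ((j : Int) - tx).toNat = x.toNat := by omega
          rw [if_pos hc,
              if_pos (⟨List.mem_cons.mpr (Or.inl (by omega)), by omega, by omega⟩ :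
                (j : Int) - tx ∈ x :: rest ∧ 0 ≤ (i : Int) - ty ∧ (i : Int) - ty < (H : Int)),
              h2]
        · rw [if_neg hc, if_neg (by
            rintro ⟨hmem, hlo, hhi⟩
            rcases List.mem_cons.mp hmem with h | h
            · exact hc ⟨by rw [PySem.List.mem_pyRange_one]; omega, by omega⟩
            · exact hm ⟨h, hlo, hhi⟩)]

-- B-side: length and cell characterization of pvShift
lemma pvShift_length {α : Type} (seq : List α) (k : Int) (pad : α) :
    (pvShift seq k pad).length = seq.length := by
  simp only [pvShift]
  split_ifs with hk
  · rw [List.length_append, List.length_replicate,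
        PySem.List.slice_to seq (by omega : (0 : Int) ≤ max 0 ((seq.length : Int) - k)),
        List.length_take]
    omega
  · rw [List.length_append, List.length_replicate,
        PySem.List.slice_from seq (by omega : (0 : Int) ≤ -k), List.length_drop]
    omega

lemma pvShift_getD {α : Type} (seq : List α) (k : Int) (pad d : α) (i : Nat)
    (hi : i < seq.length) :
    (pvShift seq k pad).getD i d =
      if 0 ≤ (i : Int) - k ∧ (i : Int) - k < (seq.length : Int)
      then seq.getD ((i : Int) - k).toNat d else pad := by
  simp only [pvShift]
  split_ifs with hk hc hc
  · -- 0 ≤ k, source index in range: k ≤ i, so i lands in the copied block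
    rw [PySem.List.slice_to seq (by omega : (0 : Int) ≤ max 0 ((seq.length : Int) - k)),
        List.getD_append_right _ _ _ _ (by simp only [List.length_replicate]; omega),
        List.length_replicate]
    have hm : (min k (seq.length : Int)).toNat = k.toNat := by omega
    rw [hm]
    have h1 : i - k.toNat < (seq.take (max 0 ((seq.length : Int) - k)).toNat).length := by
      rw [List.length_take]; omega
    rw [List.getD_eq_getElem _ d h1, List.getElem_take,
        List.getD_eq_getElem _ d (by omega : ((i : Int) - k).toNat < seq.length)]
    congr 1
    omega
  · -- 0 ≤ k, out of range: i < k, so i lands in the replicate block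
    rw [PySem.List.slice_to seq (by omega : (0 : Int) ≤ max 0 ((seq.length : Int) - k)),
        List.getD_append _ _ _ i (by simp only [List.length_replicate]; omega)]
    exact List.getD_replicate pad (by omega)
  · -- k < 0, in range: i lands in the dropped block
    rw [PySem.List.slice_from seq (by omega : (0 : Int) ≤ -k)]
    have h1 : i < (seq.drop (-k : Int).toNat).length := by rw [List.length_drop]; omega
    rw [List.getD_append _ _ _ i h1, List.getD_eq_getElem _ d h1, List.getElem_drop,
        List.getD_eq_getElem _ d (by omega : ((i : Int) - k).toNat < seq.length)]
    congr 1
    omega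
  · -- k < 0, out of range: i lands in the padding block
    rw [PySem.List.slice_from seq (by omega : (0 : Int) ≤ -k),
        List.getD_append_right _ _ _ i (by rw [List.length_drop]; omega)]
    exact List.getD_replicate pad (by simp only [List.length_drop]; omega)

-- assembling the two characterizations: on a nonempty rectangular board the ports agree
lemma translate_board_eq_alt (board : List (List Int)) (tx ty : Int) (H W : Nat)
    (hH : board.length = H)
    (hW : (board.getD 0 []).length = W)
    (hrect : ∀ r ∈ board, r.length = W) :
    translate_board board tx ty = translate_board_alt board tx ty := by
  have hshape : pvShape H W board := ⟨hH, hrect⟩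
  have hrng : ∀ x ∈ PySem.List.pyRange 0 (W : Int) 1, 0 ≤ x ∧ x.toNat < W := by
    intro x hx; rw [PySem.List.mem_pyRange_one] at hx; omega
  obtain ⟨hzs, hz⟩ := zfill (H := H) (W := W) _ hrng board hshape
  obtain ⟨hrs, hr⟩ := srow (H := H) (W := W) board tx ty _
    (fun x hx => (hrng x hx).1) _ hzs
  have hmaplen : (board.map (fun row => pvShift row tx 0)).length = H := by
    rw [List.length_map]; exact hH
  simp only [translate_board, translate_board_alt, PySem.List.pyGetD_zero, hH, hW]
  refine List.ext_getElem ?_ ?_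
  · rw [hrs.1, pvShift_length, hmaplen]
  · intro i h1 h2
    have hiH : i < H := by have := hrs.1; omega
    -- B's row i
    have hBrow : (pvShift (board.map (fun row => pvShift row tx 0)) ty
        (List.replicate W 0)).getD i [] =
        if 0 ≤ (i : Int) - ty ∧ (i : Int) - ty < (H : Int)
        then pvShift (board.getD ((i : Int) - ty).toNat []) tx 0
        else List.replicate W 0 := by
      rw [pvShift_getD _ ty _ [] i (by omega), hmaplen]
      by_cases hc : 0 ≤ (i : Int) - ty ∧ (i : Int) - ty < (H : Int)
      · rw [if_pos hc, if_pos hc,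
            List.getD_eq_getElem _ [] (by rw [List.length_map]; omega),
            List.getElem_map,
            List.getD_eq_getElem _ [] (by omega : ((i : Int) - ty).toNat < board.length)]
      · rw [if_neg hc, if_neg hc]
    -- B's row length
    have hBlen : ((pvShift (board.map (fun row => pvShift row tx 0)) ty
        (List.replicate W 0)).getD i []).length = W := by
      rw [hBrow]
      split_ifs with hc
      · rw [pvShift_length]
        have hmem : board.getD ((i : Int) - ty).toNat [] ∈ board := by
          rw [List.getD_eq_getElem _ [] (by omega : ((i : Int) - ty).toNat < board.length)]
          exact List.getElem_mem _
        exact hrect _ hmem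
      · exact List.length_replicate
    refine List.ext_getElem ?_ ?_
    · rw [← List.getD_eq_getElem _ [] h2, hBlen]
      exact hrs.2 _ (List.getElem_mem h1)
    · intro j hj1 hj2
      have hjW : j < W := by
        rw [← List.getD_eq_getElem _ [] h2, hBlen] at hj2; exact hj2
      -- A's cell
      have hAcell := hr i j hiH hjW
      unfold gget at hAcell
      have hzz := hz i j
      unfold gget at hzz
      rw [← List.getD_eq_getElem _ 0 hj1, ← List.getD_eq_getElem _ [] h1, hAcell]
      -- B's cell
      rw [← List.getD_eq_getElem _ 0 hj2, ← List.getD_eq_getElem _ [] h2, hBrow]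
      by_cases hv : 0 ≤ (i : Int) - ty ∧ (i : Int) - ty < (H : Int)
      · -- vertical in range
        have hrowlen : (board.getD ((i : Int) - ty).toNat []).length = W := by
          have hmem : board.getD ((i : Int) - ty).toNat [] ∈ board := by
            rw [List.getD_eq_getElem _ [] (by omega : ((i : Int) - ty).toNat < board.length)]
            exact List.getElem_mem _
          exact hrect _ hmem
        rw [if_pos hv, pvShift_getD _ tx _ 0 j (by omega), hrowlen]
        by_cases hh : 0 ≤ (j : Int) - tx ∧ (j : Int) - tx < (W : Int)
        · rw [if_pos hh,
              if_pos (⟨by rw [PySem.List.mem_pyRange_one]; omega, hv.1, hv.2⟩ :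
                (j : Int) - tx ∈ PySem.List.pyRange 0 (W : Int) 1 ∧
                  0 ≤ (i : Int) - ty ∧ (i : Int) - ty < (H : Int))]
        · rw [if_neg hh,
              if_neg (by
                rintro ⟨hmem, -, -⟩
                rw [PySem.List.mem_pyRange_one] at hmem
                exact hh ⟨by omega, by omega⟩),
              hzz,
              if_pos (⟨by rw [PySem.List.mem_pyRange_one]; omega, hiH⟩ :
                (j : Int) ∈ PySem.List.pyRange 0 (W : Int) 1 ∧ i < H)]
      · -- vertical out of range: both cells are 0
        rw [if_neg hv,
            if_neg (by rintro ⟨-, hlo, hhi⟩; exact hv ⟨hlo, hhi⟩),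
            hzz,
            if_pos (⟨by rw [PySem.List.mem_pyRange_one]; omega, hiH⟩ :
              (j : Int) ∈ PySem.List.pyRange 0 (W : Int) 1 ∧ i < H)]
        rw [List.getD_eq_getElem _ 0 (by rw [List.length_replicate]; exact hjW),
            List.getElem_replicate]

-- ===== VERDICT (by name: the statement is the Claim_ definition above) =====
theorem translate_board_spec : Claim_equal_translate_board := by
  intro board tx ty _hDom hPre
  exact translate_board_eq_alt board tx ty board.length (board.getD 0 []).length rfl
    rfl hPre.2
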